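-- pv_equiv track=rewrite | github.com/tilde-lab/sql_visualization | graphviz_dot_handler.py | linear_position_distribution
-- ===== SOURCE A (Python) =====
-- def linear_position_distribution(tables_structure: dict) -> str:
--     if len(tables_structure.keys()) < 10:
--         coef = 3
--     elif 16 >= len(tables_structure.keys()) >= 10:
--         coef = 4
--     else:
--         coef = 5
--     code = ''
--     code_for_row = '{ rank = same; '
--     cnt = 1
--     for table in tables_structure.keys():
--         cnt += 1
--         code_for_row += f'"{table.title()}"; '
--         if cnt == coef:
--             code_for_row += '}\n'
--             code += code_for_row
--             code_for_row = '{ rank = same; '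
--             cnt = 1
--     return code
-- ===== SOURCE B (Python) =====
-- def linear_position_distribution(tables_structure: dict) -> str:
--     keys = list(tables_structure.keys())
--     n = len(keys)
--     size = 2 if n < 10 else (3 if n <= 16 else 4)
--     titled = [f'"{k.title()}"; ' for k in keys]
--     return ''.join(
--         '{ rank = same; ' + ''.join(titled[i:i + size]) + '}\n'
--         for i in range(0, (n // size) * size, size)
--     )
-- ===== Notes on version B (the rewrite author's own statement) =====
-- stated objective: simpler
-- what changed: Replaces the running row-counter/accumulator state machine with a stateless formulation: compute the chunk size from the key count, then slice the titled key strings into complete chunks and join them into rows, dropping the trailing partial chunk via the floor-division bound.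
import Mathlib
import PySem

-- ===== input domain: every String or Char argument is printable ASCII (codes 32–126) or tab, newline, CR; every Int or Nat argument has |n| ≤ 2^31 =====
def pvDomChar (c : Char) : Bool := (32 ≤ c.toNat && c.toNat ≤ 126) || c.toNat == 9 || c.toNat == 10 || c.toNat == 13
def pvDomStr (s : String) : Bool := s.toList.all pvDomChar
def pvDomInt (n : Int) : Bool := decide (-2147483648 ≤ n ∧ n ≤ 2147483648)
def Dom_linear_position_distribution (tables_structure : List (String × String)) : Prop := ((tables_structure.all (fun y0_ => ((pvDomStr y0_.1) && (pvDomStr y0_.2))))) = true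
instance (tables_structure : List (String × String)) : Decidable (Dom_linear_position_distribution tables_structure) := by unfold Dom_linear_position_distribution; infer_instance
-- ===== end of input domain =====

-- B replaces A's running row-counter/accumulator state machine by slicing the titled keys into complete chunks and joining them (objective: simpler).

-- ===== PORT A =====
-- str.title() for the ASCII domain: an alpha char is uppercased after a non-alpha
-- (or at the start) and lowercased after an alpha; exact on Dom's characters.
def pvPyTitle : List Char → Bool → List Char
  | [], _ => []
  | c :: cs, prev =>
    (if c.isAlpha then (if prev then c.toLower else c.toUpper) else c) :: pvPyTitle cs c.isAlpha

-- f'"{table.title()}"; ' (used by both Pythons verbatim)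
def pvQuoteTitle (t : String) : List Char :=
  '"' :: (pvPyTitle t.toList false ++ ('"' :: ';' :: ' ' :: []))

def linear_position_distribution (tables_structure : List (String × String)) : String :=
  let keys := PySem.List.dedup (tables_structure.map (fun p => p.1))
  let coef : Nat :=
    if keys.length < 10 then 3
    else if 16 ≥ keys.length ∧ keys.length ≥ 10 then 4
    else 5
  let fin := keys.foldl (fun (st : List Char × List Char × Nat) table =>
      let cnt := st.2.2 + 1
      let row := st.2.1 ++ pvQuoteTitle table
      if cnt = coef then (st.1 ++ row ++ "}\n".toList, "{ rank = same; ".toList, 1)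
      else (st.1, row, cnt))
    (([] : List Char), "{ rank = same; ".toList, 1)
  String.mk fin.1

-- ===== PORT B =====
def linear_position_distribution_alt (tables_structure : List (String × String)) : String :=
  let keys := PySem.List.dedup (tables_structure.map (fun p => p.1))
  let n := keys.length
  let size : Nat := if n < 10 then 2 else if n ≤ 16 then 3 else 4
  let titled := keys.map pvQuoteTitle
  let rows := (List.range (n / size)).map (fun k =>
      "{ rank = same; ".toList ++ ((titled.drop (k * size)).take size).flatten ++ "}\n".toList)
  String.mk rows.flatten

-- ===== PRECONDITION & SPEC =====
def Spec_linear_position_distribution (tables_structure : List (String × String)) (out : String) : Prop := out = linear_position_distribution_alt tables_structure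
instance (tables_structure : List (String × String)) (out : String) : Decidable (Spec_linear_position_distribution tables_structure out) := by unfold Spec_linear_position_distribution; infer_instance

-- ===== CLAIM (what is proved, stated in full; the proofs are below) =====
def Claim_equal_linear_position_distribution : Prop := ∀ (tables_structure : List (String × String)), Dom_linear_position_distribution tables_structure → Spec_linear_position_distribution tables_structure (linear_position_distribution tables_structure)

-- ===== LEMMAS AND PROOFS =====

-- A's loop step, at the level of the already-quoted/titled entries.
def pvStep (coef : Nat) (st : List Char × List Char × Nat) (t : List Char) : List Char × List Char × Nat :=
  let cnt := st.2.2 + 1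
  let row := st.2.1 ++ t
  if cnt = coef then (st.1 ++ row ++ "}\n".toList, "{ rank = same; ".toList, 1)
  else (st.1, row, cnt)

-- If the remaining entries cannot fill the row, the loop only extends the row.
lemma pvNoFire (c : Nat) (l : List (List Char)) (code row : List Char) (cnt : Nat)
    (h : cnt + l.length < c) :
    l.foldl (pvStep c) (code, row, cnt) = (code, row ++ l.flatten, cnt + l.length) := by
  induction l generalizing row cnt with
  | nil => simp
  | cons a tl ih =>
    simp only [List.foldl_cons, pvStep]
    rw [if_neg (by simp at h; omega)]
    rw [ih (row ++ a) (cnt + 1) (by simp at h ⊢; omega)]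
    simp [List.append_assoc]
    omega

-- Running the loop over exactly the entries that complete the row emits it and resets the state.
lemma pvFire (c : Nat) (l : List (List Char)) (code row : List Char) (cnt : Nat)
    (h : cnt + l.length = c) (h1 : 0 < cnt) (h2 : cnt < c) :
    l.foldl (pvStep c) (code, row, cnt)
      = (code ++ (row ++ l.flatten) ++ "}\n".toList, "{ rank = same; ".toList, 1) := by
  induction l generalizing row cnt with
  | nil => simp at h; omega
  | cons a tl ih =>
    simp only [List.foldl_cons, pvStep]
    by_cases hc : cnt + 1 = c
    · have htl : tl = [] := by
        have : tl.length = 0 := by simp at h; omega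
        exact List.eq_nil_of_length_eq_zero this
      subst htl
      rw [if_pos hc]
      simp [List.append_assoc]
    · rw [if_neg hc]
      rw [ih (row ++ a) (cnt + 1) (by simp at h ⊢; omega) (by omega) (by omega)]
      simp [List.append_assoc]

-- Main invariant: A's fold, started on a fresh row, produces exactly B's chunk rows.
lemma pvChunks (N s : Nat) (hs : 0 < s) (l : List (List Char)) (hl : l.length ≤ N) (code : List Char) :
    (l.foldl (pvStep (s + 1)) (code, "{ rank = same; ".toList, 1)).1
      = code ++ ((List.range (l.length / s)).map (fun k =>
          "{ rank = same; ".toList ++ ((l.drop (k * s)).take s).flatten ++ "}\n".toList)).flatten := by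
  induction N generalizing l code with
  | zero =>
    have : l = [] := List.eq_nil_of_length_eq_zero (by omega)
    subst this
    simp [Nat.zero_div]
  | succ N ih =>
    by_cases hshort : l.length < s
    · rw [pvNoFire (s + 1) l code _ 1 (by omega)]
      rw [Nat.div_eq_of_lt hshort]
      simp
    · rw [Nat.not_lt] at hshort
      have hsplit : l = l.take s ++ l.drop s := (List.take_append_drop s l).symm
      conv_lhs => rw [hsplit]
      rw [List.foldl_append]
      rw [pvFire (s + 1) (l.take s) code _ 1
            (by rw [List.length_take]; omega) (by omega) (by omega)]
      rw [ih (l.drop s) (by rw [List.length_drop]; omega)]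
      rw [Nat.div_eq_sub_div hs hshort]
      rw [List.range_succ_eq_map]
      simp only [List.map_cons, List.map_map, List.flatten_cons, Nat.zero_mul, List.drop_zero,
        List.length_drop]
      have hmap : List.map ((fun k => "{ rank = same; ".toList ++
              ((l.drop (k * s)).take s).flatten ++ "}\n".toList) ∘ Nat.succ)
            (List.range ((l.length - s) / s))
          = List.map (fun k => "{ rank = same; ".toList ++
              (((l.drop s).drop (k * s)).take s).flatten ++ "}\n".toList)
            (List.range ((l.length - s) / s)) := by
        apply List.map_congr_left
        intro k _
        have harith : (k + 1) * s = k * s + s := by ring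
        simp only [Function.comp, Nat.succ_eq_add_one, List.drop_drop, harith, Nat.add_comm]
      rw [hmap]
      simp [List.append_assoc]

-- The two ports agree for every key list (the Dom hypothesis is not needed).
lemma pvPortsAgree (tables_structure : List (String × String)) :
    linear_position_distribution tables_structure = linear_position_distribution_alt tables_structure := by
  simp only [linear_position_distribution, linear_position_distribution_alt]
  generalize PySem.List.dedup (tables_structure.map (fun p => p.1)) = keys
  have hc : (if keys.length < 10 then 3
      else if 16 ≥ keys.length ∧ keys.length ≥ 10 then 4 else 5)
      = (if keys.length < 10 then 2 else if keys.length ≤ 16 then 3 else 4) + 1 := by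
    split_ifs <;> omega
  rw [hc]
  generalize hss : (if keys.length < 10 then 2 else if keys.length ≤ 16 then 3 else 4) = s
  have hs : 0 < s := by rw [← hss]; split_ifs <;> omega
  apply congrArg String.mk
  have hfold : keys.foldl (fun (st : List Char × List Char × Nat) table =>
      let cnt := st.2.2 + 1
      let row := st.2.1 ++ pvQuoteTitle table
      if cnt = s + 1 then (st.1 ++ row ++ "}\n".toList, "{ rank = same; ".toList, 1)
      else (st.1, row, cnt))
      (([] : List Char), "{ rank = same; ".toList, 1)
      = (keys.map pvQuoteTitle).foldl (pvStep (s + 1)) (([] : List Char), "{ rank = same; ".toList, 1) := by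
    rw [List.foldl_map]
    rfl
  rw [hfold]
  rw [pvChunks (keys.map pvQuoteTitle).length s hs (keys.map pvQuoteTitle) le_rfl []]
  simp

-- ===== VERDICT (by name: the statement is the Claim_ definition above) =====
theorem linear_position_distribution_spec : Claim_equal_linear_position_distribution := by
  intro ts _
  unfold Spec_linear_position_distribution
  exact pvPortsAgree ts
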